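-- pv_equiv track=rewrite | github.com/shivam-maharshi/hckn-resrch | python/src/views.py | fetchHeaderValue
-- ===== SOURCE A (Python) =====
-- def fetchHeaderValue(data, header) :
--     res = ''
--     data = data.split('\n')
--     readingValue = False
--     for d in data:
--         if (d.startswith(header)):
--             for c in d:
--                 if (not readingValue and c == ':'):
--                     readingValue = True
--                 elif (readingValue):
--                     res += c
--         else:
--             continue
--     return res.strip()
-- ===== SOURCE B (Python) =====
-- def fetchHeaderValue(data, header):
--     s = ''.join(d for d in data.split('\n') if d.startswith(header))
--     return s.partition(':')[2].strip()
-- ===== Notes on version B (the rewrite author's own statement) =====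
-- stated objective: simpler
-- what changed: Replaces the two-level loop with a global readingValue flag by one join of the header-matching lines followed by a single partition at the first colon of the joined string and a strip.
import Mathlib
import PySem

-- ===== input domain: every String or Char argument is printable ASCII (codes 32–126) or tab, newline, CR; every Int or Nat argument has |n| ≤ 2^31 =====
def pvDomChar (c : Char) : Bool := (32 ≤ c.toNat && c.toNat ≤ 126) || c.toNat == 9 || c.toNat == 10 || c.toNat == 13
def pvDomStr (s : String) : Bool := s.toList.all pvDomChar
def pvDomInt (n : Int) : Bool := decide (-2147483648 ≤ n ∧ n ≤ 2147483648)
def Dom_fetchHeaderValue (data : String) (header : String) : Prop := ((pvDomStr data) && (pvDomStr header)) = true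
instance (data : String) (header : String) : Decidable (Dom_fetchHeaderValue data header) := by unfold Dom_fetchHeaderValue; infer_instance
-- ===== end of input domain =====

-- B replaces A's character-by-character state machine (global readingValue flag over matching
-- lines) by one join of the matching lines, a partition at the first colon, and a strip.

-- ===== PORT A =====
-- inner character step: if not readingValue and c == ':' → set the flag; elif readingValue → res += c
def fvStepA (st : List Char × Bool) (c : Char) : List Char × Bool :=
  if !st.2 && c = ':' then (st.1, true)
  else if st.2 then (st.1 ++ [c], st.2)
  else st

def fetchHeaderValue (data : String) (header : String) : String :=
  let lines := PySem.Chars.splitOn data.toList ['\n']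
  let st := lines.foldl (fun st d =>
      if PySem.Chars.startswith d header.toList then d.foldl fvStepA st else st)
    ([], false)
  String.ofList (PySem.Chars.strip st.1)

-- ===== PORT B =====
-- ''.join(d for d in data.split('\n') if d.startswith(header)); then partition(':')[2].strip()
def fetchHeaderValue_alt (data : String) (header : String) : String :=
  let s := PySem.Chars.join []
    ((PySem.Chars.splitOn data.toList ['\n']).filter
      (fun d => PySem.Chars.startswith d header.toList))
  String.ofList (PySem.Chars.strip ((s.dropWhile (· ≠ ':')).drop 1))

-- ===== PRECONDITION & SPEC =====
def Spec_fetchHeaderValue (data : String) (header : String) (out : String) : Prop := out = fetchHeaderValue_alt data header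
instance (data : String) (header : String) (out : String) : Decidable (Spec_fetchHeaderValue data header out) := by unfold Spec_fetchHeaderValue; infer_instance

-- ===== CLAIM (what is proved, stated in full; the proofs are below) =====
def Claim_equal_fetchHeaderValue : Prop := ∀ (data : String) (header : String), Dom_fetchHeaderValue data header → Spec_fetchHeaderValue data header (fetchHeaderValue data header)

-- ===== LEMMAS AND PROOFS =====

-- everything after the first ':' (empty if there is none)
def afterColon (l : List Char) : List Char := (l.dropWhile (· ≠ ':')).drop 1

theorem join_empty_sep (ls : List (List Char)) : PySem.Chars.join [] ls = ls.flatten := by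
  induction ls with
  | nil => rfl
  | cons d r ih =>
    cases r with
    | nil => simp [PySem.Chars.join, List.intercalate]
    | cons e s =>
      simp only [PySem.Chars.join, List.intercalate, List.intersperse] at *
      simp [ih]

theorem foldl_fvStepA_true (l : List Char) (res : List Char) :
    l.foldl fvStepA (res, true) = (res ++ l, true) := by
  induction l generalizing res with
  | nil => simp
  | cons c t ih => simp [fvStepA, ih]

theorem foldl_fvStepA_false (l : List Char) (res : List Char) :
    l.foldl fvStepA (res, false) =
      if ':' ∈ l then (res ++ afterColon l, true) else (res, false) := by
  induction l generalizing res with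
  | nil => simp
  | cons c t ih =>
    by_cases hc : c = ':'
    · subst hc
      simp [fvStepA, foldl_fvStepA_true, afterColon]
    · have hne : ¬(':' = c) := fun h => hc h.symm
      simp [fvStepA, hc, ih, afterColon, hne]

theorem afterColon_append_of_mem (a b : List Char) (h : ':' ∈ a) :
    afterColon (a ++ b) = afterColon a ++ b := by
  induction a with
  | nil => simp at h
  | cons x t ih =>
    by_cases hx : x = ':'
    · subst hx; simp [afterColon]
    · have h' : ':' ∈ t := by
        rcases List.mem_cons.mp h with h1 | h1
        · exact absurd h1.symm hx
        · exact h1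
      simpa [afterColon, List.cons_append, List.dropWhile_cons, hx] using ih h'

theorem afterColon_append_of_not_mem (a b : List Char) (h : ':' ∉ a) :
    afterColon (a ++ b) = afterColon b := by
  induction a with
  | nil => simp
  | cons x t ih =>
    have hx : x ≠ ':' := fun hx => h (hx ▸ List.mem_cons_self)
    have h' : ':' ∉ t := fun ht => h (List.mem_cons_of_mem _ ht)
    simpa [afterColon, List.cons_append, List.dropWhile_cons, hx] using ih h'

theorem afterColon_of_not_mem (s : List Char) (h : ':' ∉ s) : afterColon s = [] := by
  have := afterColon_append_of_not_mem s [] h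
  simpa [afterColon] using this

-- the outer loop over the lines, from a general state
theorem outer_fold (ls : List (List Char)) (p : List Char → Bool) (res : List Char) :
    (ls.foldl (fun st d => if p d then d.foldl fvStepA st else st) (res, false)) =
      (let s := (ls.filter p).flatten
       if ':' ∈ s then (res ++ afterColon s, true) else (res, false)) ∧
    ∀ r : List Char,
    (ls.foldl (fun st d => if p d then d.foldl fvStepA st else st) (r, true)) =
      (r ++ (ls.filter p).flatten, true) := by
  induction ls generalizing res with
  | nil => simp
  | cons d t ih =>
    constructor
    · by_cases hp : p d
      · simp only [List.foldl_cons, hp, if_true]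
        rw [foldl_fvStepA_false]
        by_cases hd : ':' ∈ d
        · simp only [hd, if_true]
          rw [(ih (res ++ afterColon d)).2]
          simp only [List.filter_cons, hp, if_true, List.flatten_cons]
          have hmem : ':' ∈ d ++ (t.filter p).flatten := by simp [hd]
          simp only [hmem, if_true]
          rw [afterColon_append_of_mem _ _ hd, List.append_assoc]
        · simp only [hd, if_false]
          rw [(ih res).1]
          simp only [List.filter_cons, hp, if_true, List.flatten_cons]
          by_cases hs : ':' ∈ (t.filter p).flatten
          · have hmem : ':' ∈ d ++ (t.filter p).flatten := by simp [hs]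
            simp only [hs, hmem, if_true]
            rw [afterColon_append_of_not_mem _ _ hd]
          · have hmem : ':' ∉ d ++ (t.filter p).flatten := by simp [hd, hs]
            simp only [hs, hmem, if_false]
      · have hp' : p d = false := by simpa using hp
        simp only [List.foldl_cons, hp', Bool.false_eq_true, if_false]
        rw [(ih res).1]
        rw [List.filter_cons_of_neg hp]
    · intro r
      by_cases hp : p d
      · simp only [List.foldl_cons, hp, if_true]
        rw [foldl_fvStepA_true, (ih res).2]
        simp [hp, List.append_assoc]
      · have hp' : p d = false := by simpa using hp
        simp only [List.foldl_cons, hp', Bool.false_eq_true, if_false]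
        rw [(ih res).2]
        rw [List.filter_cons_of_neg hp]

-- ===== VERDICT (by name: the statement is the Claim_ definition above) =====
theorem fetchHeaderValue_spec : Claim_equal_fetchHeaderValue := by
  intro data header _
  unfold Spec_fetchHeaderValue fetchHeaderValue fetchHeaderValue_alt
  simp only []
  rw [(outer_fold (PySem.Chars.splitOn data.toList ['\n'])
        (fun d => PySem.Chars.startswith d header.toList) []).1,
    join_empty_sep]
  set s := ((PySem.Chars.splitOn data.toList ['\n']).filter
      (fun d => PySem.Chars.startswith d header.toList)).flatten with hs
  by_cases hmem : ':' ∈ s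
  · simp only [hmem, if_true]
    rfl
  · simp only [hmem, if_false]
    rw [show ((s.dropWhile (· ≠ ':')).drop 1) = afterColon s from rfl,
      afterColon_of_not_mem s hmem]
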